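-- pv_equiv track=rewrite | github.com/Twynzen/danielconsultant | deskflow-mcp/tools/metadata.py | _merge_metadata
-- ===== SOURCE A (Python) =====
-- from typing import Any, Optional
--
-- def _merge_metadata(existing: Optional[dict[str, Any]], patch: dict[str, Any]) -> dict[str, Any]:
--     """Apply `patch` on top of `existing`, removing keys explicitly set to None."""
--     merged = dict(existing or {})
--     for key, value in patch.items():
--         if value is None:
--             merged.pop(key, None)
--         else:
--             merged[key] = value
--     return merged
-- ===== SOURCE B (Python) =====
-- from typing import Any, Optional
--
-- def _merge_metadata(existing: Optional[dict[str, Any]], patch: dict[str, Any]) -> dict[str, Any]: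
--     """Apply `patch` on top of `existing`, removing keys explicitly set to None."""
--     combined = {**(existing or {}), **patch}
--     return {k: v for k, v in combined.items() if not (k in patch and patch[k] is None)}
-- ===== Notes on version B (the rewrite author's own statement) =====
-- stated objective: idiomatic
-- what changed: A's per-key loop with a pop/assign branch is replaced by building the whole union at once with dict unpacking and then filtering out, in one comprehension, exactly the keys the patch deletes; Pre_ excludes only patch association lists with duplicate keys, which cannot arise from a Python dict argument (every input A's Python actually receives is admitted).
import Mathlib
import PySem

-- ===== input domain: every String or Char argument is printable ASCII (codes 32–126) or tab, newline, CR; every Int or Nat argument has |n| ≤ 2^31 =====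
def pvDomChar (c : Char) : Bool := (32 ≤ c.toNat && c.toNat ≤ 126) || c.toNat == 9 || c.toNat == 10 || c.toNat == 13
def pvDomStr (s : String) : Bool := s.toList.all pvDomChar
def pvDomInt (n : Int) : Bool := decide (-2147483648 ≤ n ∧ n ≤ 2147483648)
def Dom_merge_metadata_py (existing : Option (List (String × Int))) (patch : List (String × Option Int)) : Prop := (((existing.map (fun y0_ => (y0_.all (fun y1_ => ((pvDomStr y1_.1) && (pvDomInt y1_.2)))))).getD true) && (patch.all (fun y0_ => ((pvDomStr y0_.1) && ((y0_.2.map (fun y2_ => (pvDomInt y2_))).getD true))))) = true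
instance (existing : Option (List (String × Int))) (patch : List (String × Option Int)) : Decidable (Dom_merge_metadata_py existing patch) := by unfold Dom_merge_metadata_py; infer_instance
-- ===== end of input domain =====

-- B builds the full union dict first and then filters out the patch-deleted keys in one
-- comprehension, instead of A's per-key loop with a pop/assign branch (idiomatic rewrite, same cost).

-- ===== PORT A =====
-- for key, value in patch.items(): if value is None: merged.pop(key, None) else: merged[key] = value
def mergeStepA (d : PySem.Dict String Int) (p : String × Option Int) : PySem.Dict String Int :=
  match p.2 with
  | none => d.erase p.1
  | some v => d.insert p.1 v

def merge_metadata_py (existing : Option (List (String × Int))) (patch : List (String × Option Int)) : List (String × Int) :=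
  (patch.foldl mergeStepA (PySem.Dict.ofList (existing.getD []))).items

-- ===== PORT B =====
-- combined = {**(existing or {}), **patch}; the values of `existing` are wrapped in `some`
-- because combined mixes them with patch's Option values (Python's Any needs no wrap).
-- {k: v for k, v in combined.items() if not (k in patch and patch[k] is None)}; the final
-- `.map` unwraps the surviving `some` values (type-forced, no Python counterpart).
def merge_metadata_py_alt (existing : Option (List (String × Int))) (patch : List (String × Option Int)) : List (String × Int) :=
  let combined := (PySem.Dict.ofList ((existing.getD []).map (fun q => (q.1, some q.2)))).update patch
  combined.items.filterMap (fun q =>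
    if (PySem.Dict.ofList patch).get? q.1 = some none then none
    else q.2.map (fun x => (q.1, x)))

-- ===== PRECONDITION & SPEC =====
-- Pre_ excludes only patch association lists with duplicate keys: a Python dict argument can
-- never contain them, and on such lists the two merge orders are both representation accidents.
def Pre_merge_metadata_py (existing : Option (List (String × Int))) (patch : List (String × Option Int)) : Prop :=
  (patch.map Prod.fst).Nodup
instance (existing : Option (List (String × Int))) (patch : List (String × Option Int)) : Decidable (Pre_merge_metadata_py existing patch) := by unfold Pre_merge_metadata_py; infer_instance

def pvWitness_merge_metadata_py : (Option (List (String × Int))) × (List (String × Option Int)) :=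
  (some [("a", 1), ("c", 3)], [("a", none), ("b", some 2)])

def Spec_merge_metadata_py (existing : Option (List (String × Int))) (patch : List (String × Option Int)) (out : List (String × Int)) : Prop := out = merge_metadata_py_alt existing patch
instance (existing : Option (List (String × Int))) (patch : List (String × Option Int)) (out : List (String × Int)) : Decidable (Spec_merge_metadata_py existing patch out) := by unfold Spec_merge_metadata_py; infer_instance

-- ===== CLAIM (what is proved, stated in full; the proofs are below) =====
def Claim_equal_merge_metadata_py : Prop := ∀ (existing : Option (List (String × Int))) (patch : List (String × Option Int)), Dom_merge_metadata_py existing patch → Pre_merge_metadata_py existing patch → Spec_merge_metadata_py existing patch (merge_metadata_py existing patch)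

-- ===== LEMMAS AND PROOFS =====

-- drop the None-valued entries, unwrapping the rest (the value-level content of B's filter)
def dropNone (q : String × Option Int) : Option (String × Int) := q.2.map (fun x => (q.1, x))

-- a fold of inserts over keys not containing x leaves get? x unchanged
theorem get?_foldl_insert_not_mem {ν : Type} (l : List (String × ν)) (d : PySem.Dict String ν) (x : String)
    (hx : x ∉ l.map Prod.fst) :
    (l.foldl (fun acc p => acc.insert p.1 p.2) d).get? x = d.get? x := by
  induction l generalizing d with
  | nil => rfl
  | cons q t ih =>
      simp only [List.map_cons, List.mem_cons, not_or] at hx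
      simp only [List.foldl_cons]
      rw [ih _ hx.2, PySem.Dict.get?_insert_of_ne _ _ hx.1]

-- two starting dicts agreeing off k keep agreeing off k through a fold of inserts
theorem get?_foldl_insert_congr_off {ν : Type} (l : List (String × ν)) (d d' : PySem.Dict String ν) (k : String)
    (h : ∀ y, y ≠ k → d.get? y = d'.get? y) :
    ∀ x, x ≠ k → (l.foldl (fun acc p => acc.insert p.1 p.2) d).get? x
      = (l.foldl (fun acc p => acc.insert p.1 p.2) d').get? x := by
  induction l generalizing d d' with
  | nil => exact h
  | cons q t ih =>
      intro x hx
      simp only [List.foldl_cons]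
      refine ih _ _ (fun y hy => ?_) x hx
      rw [PySem.Dict.get?_insert, PySem.Dict.get?_insert]
      split
      · rfl
      · exact h y hy

theorem get?_ofList_not_mem {ν : Type} (l : List (String × ν)) (x : String) (hx : x ∉ l.map Prod.fst) :
    (PySem.Dict.ofList l).get? x = none := by
  unfold PySem.Dict.ofList PySem.Dict.update
  rw [get?_foldl_insert_not_mem l _ x hx]; rfl

theorem get?_ofList_cons {ν : Type} (k : String) (v : ν) (rest : List (String × ν))
    (hk : k ∉ rest.map Prod.fst) (x : String) :
    (PySem.Dict.ofList ((k, v) :: rest)).get? x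
      = if x = k then some v else (PySem.Dict.ofList rest).get? x := by
  unfold PySem.Dict.ofList PySem.Dict.update
  simp only [List.foldl_cons]
  by_cases hxk : x = k
  · subst hxk
    rw [if_pos rfl, get?_foldl_insert_not_mem rest _ x hk, PySem.Dict.get?_insert_self]
  · rw [if_neg hxk]
    exact get?_foldl_insert_congr_off rest _ _ k
      (fun y hy => PySem.Dict.get?_insert_of_ne _ _ hy) x hxk

theorem dropNone_none (a : String) : dropNone (a, none) = none := rfl
theorem dropNone_some (a : String) (x : Int) : dropNone (a, some x) = some (a, x) := rfl

-- the filtered view contains k exactly when the Option-valued dict does (no (k, none) entry)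
theorem any_filterMap_dropNone (LB : List (String × Option Int)) (k : String)
    (h : ((k : String), (none : Option Int)) ∉ LB) :
    (LB.filterMap dropNone).any (fun p => p.1 == k) = LB.any (fun p => p.1 == k) := by
  induction LB with
  | nil => rfl
  | cons q t ih =>
      simp only [List.mem_cons, not_or] at h
      match q with
      | (a, none) =>
          have ha : (a == k) = false := by
            simp only [beq_eq_false_iff_ne]; rintro rfl; exact h.1 rfl
          simp only [List.filterMap_cons, dropNone_none, List.any_cons, ha, Bool.false_or]
          exact ih h.2
      | (a, some y) =>
          simp only [List.filterMap_cons, dropNone_some, List.any_cons]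
          rw [ih h.2]

-- replacing the (unique, non-none) entry at k by a some value commutes with dropNone
theorem filterMap_map_replace_some (t : List (String × Option Int)) (k : String) (x0 : Int)
    (h : ((k : String), (none : Option Int)) ∉ t) :
    List.filterMap dropNone (t.map (fun p => if (p.1 == k) = true then (k, some x0) else p))
      = (List.filterMap dropNone t).map (fun p => if (p.1 == k) = true then (k, x0) else p) := by
  induction t with
  | nil => rfl
  | cons q t ih =>
      simp only [List.mem_cons, not_or] at h
      match q with
      | (a, none) =>
          have ha : (a == k) = false := by
            simp only [beq_eq_false_iff_ne]; rintro rfl; exact h.1 rfl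
          simp only [List.map_cons, List.filterMap_cons, ha, Bool.false_eq_true, if_neg,
            not_false_iff, dropNone_none]
          exact ih h.2
      | (a, some y) =>
          by_cases hak : (a == k) = true
          · simp only [List.map_cons, List.filterMap_cons, hak, if_pos, dropNone_some,
              List.map_cons]
            rw [ih h.2]
          · simp only [Bool.not_eq_true] at hak
            simp only [List.map_cons, List.filterMap_cons, hak, Bool.false_eq_true, if_neg,
              not_false_iff, dropNone_some, List.map_cons]
            rw [ih h.2]

-- replacing the (unique, non-none) entry at k by none is, after dropNone, a filter
theorem filterMap_map_replace_none (t : List (String × Option Int)) (k : String)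
    (h : ((k : String), (none : Option Int)) ∉ t) :
    List.filterMap dropNone (t.map (fun p => if (p.1 == k) = true then (k, (none : Option Int)) else p))
      = (List.filterMap dropNone t).filter (fun p => !(p.1 == k)) := by
  induction t with
  | nil => rfl
  | cons q t ih =>
      simp only [List.mem_cons, not_or] at h
      match q with
      | (a, none) =>
          have ha : (a == k) = false := by
            simp only [beq_eq_false_iff_ne]; rintro rfl; exact h.1 rfl
          simp only [List.map_cons, List.filterMap_cons, ha, Bool.false_eq_true, if_neg,
            not_false_iff, dropNone_none]
          exact ih h.2
      | (a, some y) =>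
          by_cases hak : (a == k) = true
          · simp only [List.map_cons, List.filterMap_cons, hak, if_pos, dropNone_none,
              dropNone_some, List.filter_cons, Bool.not_true, Bool.false_eq_true, if_neg,
              not_false_iff]
            exact ih h.2
          · simp only [Bool.not_eq_true] at hak
            simp only [List.map_cons, List.filterMap_cons, hak, Bool.false_eq_true, if_neg,
              not_false_iff, dropNone_some, List.filter_cons, Bool.not_false, if_pos]
            rw [ih h.2]

-- insert of a some value commutes with the dropNone view
theorem insert_some_comm (LB : List (String × Option Int)) (k : String) (x0 : Int)
    (h : ((k : String), (none : Option Int)) ∉ LB) :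
    ((PySem.Dict.mk LB).insert k (some x0)).items.filterMap dropNone
      = ((PySem.Dict.mk (LB.filterMap dropNone)).insert k x0).items := by
  simp only [PySem.Dict.insert, PySem.Dict.contains, any_filterMap_dropNone LB k h]
  by_cases hc : LB.any (fun p => p.1 == k) = true
  · simp only [hc, if_pos]
    exact filterMap_map_replace_some LB k x0 h
  · simp only [Bool.not_eq_true] at hc
    simp [hc, List.filterMap_append, dropNone]

-- insert of none commutes with the dropNone view of erase
theorem insert_none_comm (LB : List (String × Option Int)) (k : String)
    (h : ((k : String), (none : Option Int)) ∉ LB) :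
    ((PySem.Dict.mk LB).insert k none).items.filterMap dropNone
      = ((PySem.Dict.mk (LB.filterMap dropNone)).erase k).items := by
  simp only [PySem.Dict.insert, PySem.Dict.erase, PySem.Dict.contains]
  by_cases hc : LB.any (fun p => p.1 == k) = true
  · simp only [hc, if_pos]
    exact filterMap_map_replace_none LB k h
  · simp only [Bool.not_eq_true] at hc
    simp only [hc, Bool.false_eq_true, if_neg, not_false_iff]
    rw [List.filterMap_append]
    have hall : ∀ p ∈ LB.filterMap dropNone, (!(p.1 == k)) = true := by
      intro p hp
      rcases List.mem_filterMap.mp hp with ⟨⟨a, ov⟩, hq, hdq⟩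
      cases ov with
      | none => simp [dropNone] at hdq
      | some y =>
          simp only [dropNone_some, Option.some_inj] at hdq
          subst hdq
          simp only [Bool.not_eq_eq_eq_not, Bool.not_true, beq_eq_false_iff_ne]
          intro hak
          have : LB.any (fun p => p.1 == k) = true :=
            List.any_eq_true.mpr ⟨(a, some y), hq, by simp [hak]⟩
          rw [hc] at this; cases this
    rw [List.filter_eq_self.mpr hall]
    simp [dropNone]

-- the main loop invariant: A's fold over patch is the filtered view of B's union fold
theorem merge_loop_eq (p : List (String × Option Int)) :
    ∀ (dA : PySem.Dict String Int) (dB : PySem.Dict String (Option Int)),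
    (p.map Prod.fst).Nodup → dB.keys.Nodup →
    dA.items = dB.items.filterMap dropNone →
    (∀ k, dB.get? k = some none → k ∉ p.map Prod.fst) →
    (p.foldl mergeStepA dA).items
      = (dB.update p).items.filterMap
          (fun q => if (PySem.Dict.ofList p).get? q.1 = some none then none else dropNone q) := by
  induction p with
  | nil =>
      intro dA dB _ _ hrel _
      simp only [List.foldl_nil, PySem.Dict.update, hrel]
      exact (List.filterMap_congr (fun q _ => by simp [PySem.Dict.ofList, PySem.Dict.update, PySem.Dict.get?, PySem.Dict.empty])).symm
  | cons kv rest ih =>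
      intro dA dB hp hnB hrel hnone
      obtain ⟨k, v⟩ := kv
      simp only [List.map_cons, List.nodup_cons] at hp
      have hknone : ((k : String), (none : Option Int)) ∉ dB.items := by
        intro hmem
        have := PySem.Dict.get?_of_mem_items dB hmem hnB
        exact (hnone k this) (by simp)
      have hnone' : ∀ k', (dB.insert k v).get? k' = some none → k' ∉ rest.map Prod.fst := by
        intro k' hk'
        rw [PySem.Dict.get?_insert] at hk'
        by_cases hkk : k' = k
        · rw [if_pos hkk] at hk'
          cases hk'; rw [hkk]; exact hp.1
        · rw [if_neg hkk] at hk'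
          intro hmem
          exact (hnone k' hk') (by simp [hmem])
      have hnB' : (dB.insert k v).keys.Nodup := PySem.Dict.nodup_keys_insert dB k v hnB
      have hrel' : (mergeStepA dA (k, v)).items = (dB.insert k v).items.filterMap dropNone := by
        cases v with
        | none =>
            have h2 := insert_none_comm dB.items k hknone
            rw [← hrel] at h2
            simpa [mergeStepA] using h2.symm
        | some x0 =>
            have h2 := insert_some_comm dB.items k x0 hknone
            rw [← hrel] at h2
            simpa [mergeStepA] using h2.symm
      have hupd : dB.update ((k, v) :: rest) = (dB.insert k v).update rest := rfl
      rw [List.foldl_cons, hupd,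
        ih (mergeStepA dA (k, v)) (dB.insert k v) hp.2 hnB' hrel' hnone']
      refine List.filterMap_congr (fun q hq => ?_)
      obtain ⟨q1, q2⟩ := q
      by_cases hqk : q1 = k
      · -- the unique item at key k in the final dict is (k, v)
        have hfin : ((dB.insert k v).update rest).get? k = some v := by
          unfold PySem.Dict.update
          rw [get?_foldl_insert_not_mem rest _ k hp.1, PySem.Dict.get?_insert_self]
        have hfinnd : ((dB.insert k v).update rest).keys.Nodup := by
          unfold PySem.Dict.update
          exact PySem.Dict.nodup_keys_foldl_insert_key rest Prod.fst (fun _ x => x.2) _ hnB'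
        have hq2 : q2 = v := by
          have hq' : ((k : String), q2) ∈ ((dB.insert k v).update rest).items := hqk ▸ hq
          have hget := PySem.Dict.get?_of_mem_items _ hq' hfinnd
          rw [hfin] at hget; cases hget; rfl
        have hqv : ((q1 : String), q2) = (k, v) := by rw [hqk, hq2]
        rw [hqv, get?_ofList_cons k v rest hp.1]
        cases v with
        | none => simp [dropNone]
        | some y => simp [get?_ofList_not_mem rest k hp.1]
      · rw [get?_ofList_cons k v rest hp.1, if_neg hqk]

-- the B-side starting dict is the some-wrapped image of the A-side one
theorem ofList_map_some (l : List (String × Int)) :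
    ∀ d : PySem.Dict String Int,
    (l.map (fun q => (q.1, some q.2))).foldl (fun acc p => acc.insert p.1 p.2)
        (PySem.Dict.mk (d.items.map (fun q => (q.1, some q.2))))
      = PySem.Dict.mk ((l.foldl (fun acc p => acc.insert p.1 p.2) d).items.map (fun q => (q.1, some q.2))) := by
  induction l with
  | nil => intro d; rfl
  | cons q t ih =>
      intro d
      simp only [List.map_cons, List.foldl_cons]
      have hstep : (PySem.Dict.mk (d.items.map (fun r => (r.1, some r.2)))).insert q.1 (some q.2)
          = PySem.Dict.mk ((d.insert q.1 q.2).items.map (fun r => (r.1, some r.2))) := by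
        simp only [PySem.Dict.insert, PySem.Dict.contains, List.any_map]
        by_cases hc : d.items.any (fun p => p.1 == q.1) = true
        · have hc' : (d.items.any ((fun p => p.1 == q.1) ∘ fun r => (r.1, some r.2))) = true := by
            simpa [Function.comp] using hc
          simp only [hc, hc', if_pos, List.map_map]
          congr 1
          apply List.map_congr_left
          intro r _
          by_cases hr : (r.1 == q.1) = true <;> simp [Function.comp, hr]
        · simp only [Bool.not_eq_true] at hc
          have hc' : (d.items.any ((fun p => p.1 == q.1) ∘ fun r => (r.1, some r.2))) = false := by
            simpa [Function.comp] using hc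
          simp [hc, hc', List.map_append]
      rw [hstep, ih (d.insert q.1 q.2)]

-- ===== VERDICT (by name: the statement is the Claim_ definition above) =====
theorem merge_metadata_py_spec : Claim_equal_merge_metadata_py := by
  intro existing patch _ hpre
  unfold Spec_merge_metadata_py merge_metadata_py merge_metadata_py_alt
  have hB0 : PySem.Dict.ofList ((existing.getD []).map (fun q => (q.1, some q.2)))
      = PySem.Dict.mk ((PySem.Dict.ofList (existing.getD [])).items.map (fun q => (q.1, some q.2))) := by
    unfold PySem.Dict.ofList PySem.Dict.update
    exact ofList_map_some (existing.getD []) PySem.Dict.empty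
  rw [merge_loop_eq patch (PySem.Dict.ofList (existing.getD []))
      (PySem.Dict.ofList ((existing.getD []).map (fun q => (q.1, some q.2)))) hpre
      (PySem.Dict.nodup_keys_ofList _)
      (by
        have hid : ∀ L : List (String × Int),
            List.filterMap (dropNone ∘ fun q => (q.1, some q.2)) L = L := by
          intro L
          simp [dropNone, Function.comp]
        rw [hB0, List.filterMap_map, hid])
      (by
        intro k hk
        have hm := PySem.Dict.mem_items_of_get?_eq_some _ hk
        rw [hB0] at hm
        simp at hm)]
  simp [dropNone]
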